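-- pv_equiv track=rewrite | github.com/whiteshark05/Competitive-Programming | Atcoder/AtCoder Beginner Contest 292/C_Four_Variables.py | solve
-- ===== SOURCE A (Python) =====
-- def solve(N):
--     def divisors(n):
--         divisors = []
--         for d in range(1, int(n**0.5)+1):
--             if n % d == 0:
--                 divisors.append(d)
--                 if d != n//d:
--                     divisors.append(n//d)
--         if int(n**0.5)**2 == n:
--             divisors.remove(int(n**0.5))
--         return divisors
--
--
--     count = 0
--     for B in range(1, N+1):
--         for A in range(1, min(N//B, N)+1):
--             divisors = [d for d in range(1, N-A*B+1) if (N-A*B)%d == 0]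
--             count += len(divisors)
--     return count
-- ===== SOURCE B (Python) =====
-- def solve(N):
--     # Divisor-count sieve, then convolution: answer = sum_{s} d(s)*d(N-s).
--     cnt = {}
--     for i in range(1, N + 1):
--         for q in range(1, N // i + 1):
--             k = q * i
--             cnt[k] = cnt.get(k, 0) + 1
--     total = 0
--     for s in range(1, N):
--         total += cnt.get(s, 0) * cnt.get(N - s, 0)
--     return total
-- ===== Notes on version B (the rewrite author's own statement) =====
-- stated objective: faster
-- what changed: A brute-forces all (A,B) pairs and rescans 1..N-A*B for divisors of the remainder; B builds a divisor-count table once with a multiples sieve and returns the convolution sum d(s)*d(N-s).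
import Mathlib
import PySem

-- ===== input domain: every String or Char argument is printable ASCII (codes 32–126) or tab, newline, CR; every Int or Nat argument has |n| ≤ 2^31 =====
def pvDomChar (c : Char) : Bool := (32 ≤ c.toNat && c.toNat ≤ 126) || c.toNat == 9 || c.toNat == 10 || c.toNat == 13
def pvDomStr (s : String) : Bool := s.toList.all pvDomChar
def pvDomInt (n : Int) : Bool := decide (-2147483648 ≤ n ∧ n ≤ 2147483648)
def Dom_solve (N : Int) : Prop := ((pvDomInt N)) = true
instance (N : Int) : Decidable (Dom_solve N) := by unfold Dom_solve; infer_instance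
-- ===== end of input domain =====

-- B replaces A's brute-force double loop (with an inner trial-division scan) by a divisor-count
-- sieve and a convolution sum — an asymptotically faster algorithm with the same value.

-- ===== PORT A =====
-- (A's nested helper `divisors(n)` is dead code — it is never called — and is therefore not ported.)
def solve (N : Int) : Int :=
  (PySem.List.pyRange 1 (N + 1) 1).foldl (fun count B =>
    (PySem.List.pyRange 1 (min (PySem.Int.floordiv N B) N + 1) 1).foldl (fun count A =>
      count + (((PySem.List.pyRange 1 (N - A * B + 1) 1).filter
        (fun d => PySem.Int.mod (N - A * B) d == 0)).length : Int)) count) 0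

-- ===== PORT B =====
def solve_alt (N : Int) : Int :=
  let cnt : PySem.Dict Int Int :=
    (PySem.List.pyRange 1 (N + 1) 1).foldl (fun cnt i =>
      (PySem.List.pyRange 1 (PySem.Int.floordiv N i + 1) 1).foldl (fun cnt q =>
        let k := q * i
        cnt.insert k (cnt.getD k 0 + 1)) cnt) PySem.Dict.empty
  (PySem.List.pyRange 1 N 1).foldl (fun total s =>
    total + cnt.getD s 0 * cnt.getD (N - s) 0) 0

-- ===== PRECONDITION & SPEC =====
def Spec_solve (N : Int) (out : Int) : Prop := out = solve_alt N
instance (N : Int) (out : Int) : Decidable (Spec_solve N out) := by unfold Spec_solve; infer_instance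

-- ===== CLAIM (what is proved, stated in full; the proofs are below) =====
def Claim_equal_solve : Prop := ∀ (N : Int), Dom_solve N → Spec_solve N (solve N)

-- ===== LEMMAS AND PROOFS =====

-- number of divisors of m lying in [1, m], as a Finset card (the common value both programs compute)
def tauF (m : Int) : Finset Int :=
  ((PySem.List.pyRange 1 (m + 1) 1).filter (fun d => PySem.Int.mod m d == 0)).toFinset
def tau (m : Int) : Int := ((tauF m).card : Int)

lemma toFinset_pyRange (a b : Int) : (PySem.List.pyRange a b 1).toFinset = Finset.Ico a b := by
  ext x; simp [PySem.List.mem_pyRange_one, Finset.mem_Ico]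

lemma sum_map_pyRange (a b : Int) (f : Int → Int) :
    ((PySem.List.pyRange a b 1).map f).sum = ∑ x ∈ Finset.Ico a b, f x := by
  rw [← List.sum_toFinset f (PySem.List.nodup_pyRange_one a b), toFinset_pyRange]

lemma Ico_succ_Icc (a b : Int) : Finset.Ico a (b + 1) = Finset.Icc a b := by
  ext x; simp [Finset.mem_Ico, Finset.mem_Icc]

lemma mem_tauF (m d : Int) : d ∈ tauF m ↔ 1 ≤ d ∧ d ≤ m ∧ d ∣ m := by
  simp only [tauF, List.mem_toFinset, List.mem_filter, PySem.List.mem_pyRange_one,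
    beq_iff_eq, PySem.Int.mod_eq_zero_iff_dvd]
  omega

lemma tau_zero : tau 0 = 0 := by decide

lemma tlen_eq_tau (m : Int) :
    (((PySem.List.pyRange 1 (m + 1) 1).filter
      (fun d => PySem.Int.mod m d == 0)).length : Int) = tau m := by
  unfold tau tauF
  rw [List.toFinset_card_of_nodup ((PySem.List.nodup_pyRange_one 1 (m + 1)).filter _)]

lemma solve_eq_sum (N : Int) :
    solve N = ∑ B ∈ Finset.Ico 1 (N + 1),
      ∑ A ∈ Finset.Ico 1 (min (PySem.Int.floordiv N B) N + 1), tau (N - A * B) := by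
  unfold solve
  simp only [PySem.List.foldl_add, zero_add, sum_map_pyRange, tlen_eq_tau]

lemma fiber_card (N P : Int) (h1 : 1 ≤ P) (hPN : P ≤ N) :
    ((((Finset.Icc 1 N) ×ˢ (Finset.Icc 1 N)).filter
        (fun p => p.2 * p.1 ≤ N)).filter (fun p => p.2 * p.1 = P)).card = (tauF P).card := by
  apply Finset.card_nbij' (i := fun p => p.2) (j := fun d => (P / d, d))
  · intro p hp
    simp only [Finset.coe_filter, Finset.mem_product, Finset.mem_Icc, Set.mem_setOf_eq,
      Finset.mem_filter] at hp
    obtain ⟨⟨⟨⟨hB1, hBN⟩, hA1, hAN⟩, hle⟩, hP⟩ := hp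
    simp only [Finset.mem_coe, mem_tauF]
    refine ⟨hA1, ?_, ⟨p.1, hP.symm⟩⟩
    calc p.2 ≤ p.2 * p.1 := le_mul_of_one_le_right (by omega) hB1
    _ = P := hP
  · intro d hd
    simp only [Finset.mem_coe, mem_tauF] at hd
    obtain ⟨hd1, hdP, hdvd⟩ := hd
    have hd0 : 0 < d := by omega
    have hPd1 : 1 ≤ P / d := by
      rw [Int.le_ediv_iff_mul_le hd0]; omega
    have hPdle : P / d ≤ P := Int.ediv_le_self _ (by omega)
    have hmul : P / d * d = P := Int.ediv_mul_cancel hdvd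
    simp only [Finset.coe_filter, Finset.mem_product, Finset.mem_Icc, Set.mem_setOf_eq,
      Finset.mem_filter]
    refine ⟨⟨⟨⟨hPd1, by omega⟩, hd1, by omega⟩, ?_⟩, ?_⟩
    · rw [mul_comm, hmul]; omega
    · rw [mul_comm, hmul]
  · intro p hp
    simp only [Finset.coe_filter, Finset.mem_product, Finset.mem_Icc, Set.mem_setOf_eq,
      Finset.mem_filter] at hp
    obtain ⟨⟨⟨⟨hB1, hBN⟩, hA1, hAN⟩, hle⟩, hP⟩ := hp
    have : P / p.2 = p.1 := by
      rw [← hP, Int.mul_ediv_cancel_left _ (by omega)]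
    simp only [this]
  · intro d _
    rfl

lemma exchange (N : Int) (hN : 1 ≤ N) :
    ∑ B ∈ Finset.Icc 1 N, ∑ A ∈ Finset.Icc 1 (min (PySem.Int.floordiv N B) N), tau (N - A * B)
      = ∑ P ∈ Finset.Icc 1 N, tau P * tau (N - P) := by
  have hmin : ∀ B ∈ Finset.Icc 1 N, min (PySem.Int.floordiv N B) N = PySem.Int.floordiv N B := by
    intro B hB
    simp only [Finset.mem_Icc] at hB
    have hB0 : (0:Int) < B := by omega
    have : PySem.Int.floordiv N B < N + 1 := by
      rw [PySem.Int.floordiv_lt_iff_lt_mul hB0]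
      have : N + 1 ≤ (N + 1) * B := le_mul_of_one_le_right (by omega) (by omega)
      omega
    omega
  have hinner : ∀ B ∈ Finset.Icc 1 N,
      ∑ A ∈ Finset.Icc 1 (min (PySem.Int.floordiv N B) N), tau (N - A * B)
        = ∑ A ∈ Finset.Icc 1 N, if A * B ≤ N then tau (N - A * B) else 0 := by
    intro B hB
    rw [hmin B hB, ← Finset.sum_filter]
    apply Finset.sum_congr _ (fun _ _ => rfl)
    simp only [Finset.mem_Icc] at hB
    have hB0 : (0:Int) < B := by omega
    ext A
    simp only [Finset.mem_filter, Finset.mem_Icc, PySem.Int.le_floordiv_iff_mul_le hB0]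
    constructor
    · intro ⟨hA1, hAB⟩
      have : A ≤ A * B := le_mul_of_one_le_right (by omega) (by omega)
      exact ⟨⟨hA1, by omega⟩, hAB⟩
    · exact fun ⟨⟨hA1, _⟩, hAB⟩ => ⟨hA1, hAB⟩
  rw [Finset.sum_congr rfl hinner]
  rw [← Finset.sum_product' (s := Finset.Icc 1 N) (t := Finset.Icc 1 N)
      (f := fun B A => if A * B ≤ N then tau (N - A * B) else 0)]
  have hsf : ∑ p ∈ Finset.Icc 1 N ×ˢ Finset.Icc 1 N,
      (if p.2 * p.1 ≤ N then tau (N - p.2 * p.1) else 0)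
      = ∑ p ∈ (Finset.Icc 1 N ×ˢ Finset.Icc 1 N).filter (fun p => p.2 * p.1 ≤ N),
          tau (N - p.2 * p.1) := (Finset.sum_filter _ _).symm
  rw [hsf]
  have hmaps : ∀ p ∈ (Finset.Icc 1 N ×ˢ Finset.Icc 1 N).filter (fun p => p.2 * p.1 ≤ N),
      p.2 * p.1 ∈ Finset.Icc 1 N := by
    intro p hp
    simp only [Finset.mem_filter, Finset.mem_product, Finset.mem_Icc] at hp ⊢
    obtain ⟨⟨⟨hB1, _⟩, hA1, _⟩, hle⟩ := hp
    refine ⟨?_, hle⟩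
    calc (1:Int) ≤ p.2 := hA1
    _ ≤ p.2 * p.1 := le_mul_of_one_le_right (by omega) hB1
  rw [← Finset.sum_fiberwise_of_maps_to hmaps (fun p => tau (N - p.2 * p.1))]
  apply Finset.sum_congr rfl
  intro P hP
  simp only [Finset.mem_Icc] at hP
  have : ∀ p ∈ ((Finset.Icc 1 N ×ˢ Finset.Icc 1 N).filter
      (fun p => p.2 * p.1 ≤ N)).filter (fun p => p.2 * p.1 = P),
      tau (N - p.2 * p.1) = tau (N - P) := by
    intro p hp
    simp only [Finset.mem_filter] at hp
    rw [hp.2]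
  rw [Finset.sum_congr rfl this, Finset.sum_const, nsmul_eq_mul,
    fiber_card N P hP.1 hP.2]
  rfl

lemma getD_outer (N : Int) (L : List Int) (d : PySem.Dict Int Int) (v : Int) :
    (L.foldl (fun cnt i =>
        (PySem.List.pyRange 1 (PySem.Int.floordiv N i + 1) 1).foldl (fun cnt q =>
          cnt.insert (q * i) (cnt.getD (q * i) 0 + 1)) cnt) d).getD v 0
      = d.getD v 0
        + (L.map (fun i =>
            ((((PySem.List.pyRange 1 (PySem.Int.floordiv N i + 1) 1).map
                (fun q => q * i)).count v : Nat) : Int))).sum := by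
  induction L generalizing d with
  | nil => simp
  | cons i L ih =>
    simp only [List.foldl_cons, List.map_cons, List.sum_cons, ih]
    have hstep : ((PySem.List.pyRange 1 (PySem.Int.floordiv N i + 1) 1).foldl
        (fun cnt q => cnt.insert (q * i) (cnt.getD (q * i) 0 + 1)) d).getD v 0
        = d.getD v 0 + ((((PySem.List.pyRange 1 (PySem.Int.floordiv N i + 1) 1).map
            (fun q => q * i)).count v : Nat) : Int) := by
      rw [← List.foldl_map (f := fun q => q * i)
        (g := fun (cnt : PySem.Dict Int Int) k => cnt.insert k (cnt.getD k 0 + 1))]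
      exact PySem.Dict.getD_foldl_insert_add_one _ d v
    rw [hstep]
    ring

lemma count_mult (N i v : Int) (hi : 1 ≤ i) :
    ((((PySem.List.pyRange 1 (PySem.Int.floordiv N i + 1) 1).map
        (fun q => q * i)).count v : Nat) : Int)
      = if i ∣ v ∧ i ≤ v ∧ v ≤ N then 1 else 0 := by
  have hi0 : (0:Int) < i := by omega
  have hnd : (((PySem.List.pyRange 1 (PySem.Int.floordiv N i + 1) 1).map
      (fun q => q * i))).Nodup :=
    (PySem.List.nodup_pyRange_one _ _).map (mul_left_injective₀ (by omega))
  have hmem : v ∈ ((PySem.List.pyRange 1 (PySem.Int.floordiv N i + 1) 1).map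
      (fun q => q * i)) ↔ (i ∣ v ∧ i ≤ v ∧ v ≤ N) := by
    simp only [List.mem_map, PySem.List.mem_pyRange_one]
    constructor
    · rintro ⟨q, ⟨hq1, hq2⟩, rfl⟩
      have hqN : q * i ≤ N := (PySem.Int.le_floordiv_iff_mul_le hi0).1 (by omega)
      exact ⟨⟨q, mul_comm q i⟩, le_mul_of_one_le_left (by omega) hq1, hqN⟩
    · rintro ⟨⟨c, rfl⟩, hiv, hvN⟩
      refine ⟨c, ⟨?_, ?_⟩, mul_comm c i⟩
      · nlinarith
      · have h1 : c * i ≤ N := by rw [mul_comm]; exact hvN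
        have := (PySem.Int.le_floordiv_iff_mul_le hi0).2 h1
        omega
  by_cases h : i ∣ v ∧ i ≤ v ∧ v ≤ N
  · rw [if_pos h, List.count_eq_one_of_mem hnd (hmem.2 h)]
    simp
  · rw [if_neg h, List.count_eq_zero_of_not_mem (fun hm => h (hmem.1 hm))]
    simp

lemma cnt_val (N v : Int) (hvN : v ≤ N) :
    (∑ i ∈ Finset.Ico 1 (N + 1), if i ∣ v ∧ i ≤ v ∧ v ≤ N then (1 : Int) else 0) = tau v := by
  rw [Ico_succ_Icc]
  have hc : ∀ i ∈ Finset.Icc 1 N,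
      (if i ∣ v ∧ i ≤ v ∧ v ≤ N then (1 : Int) else 0)
        = (if i ∣ v ∧ i ≤ v then (1 : Int) else 0) := by
    intro i _
    simp [hvN]
  rw [Finset.sum_congr rfl hc, Finset.sum_boole]
  have hset : ((Finset.Icc 1 N).filter (fun i => i ∣ v ∧ i ≤ v)) = tauF v := by
    ext d
    simp only [Finset.mem_filter, Finset.mem_Icc, mem_tauF]
    constructor
    · rintro ⟨⟨ha, _⟩, hd, hdv⟩
      exact ⟨ha, hdv, hd⟩
    · rintro ⟨ha, hdv, hd⟩
      exact ⟨⟨ha, by omega⟩, hd, hdv⟩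
  rw [hset]
  rfl

lemma cnt_final (N v : Int) (hvN : v ≤ N) :
    ((PySem.List.pyRange 1 (N + 1) 1).foldl (fun cnt i =>
        (PySem.List.pyRange 1 (PySem.Int.floordiv N i + 1) 1).foldl (fun cnt q =>
          cnt.insert (q * i) (cnt.getD (q * i) 0 + 1)) cnt) PySem.Dict.empty).getD v 0
      = tau v := by
  rw [getD_outer]
  have hmap : (PySem.List.pyRange 1 (N + 1) 1).map (fun i =>
      ((((PySem.List.pyRange 1 (PySem.Int.floordiv N i + 1) 1).map
          (fun q => q * i)).count v : Nat) : Int))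
      = (PySem.List.pyRange 1 (N + 1) 1).map (fun i =>
          if i ∣ v ∧ i ≤ v ∧ v ≤ N then (1 : Int) else 0) := by
    apply List.map_congr_left
    intro i hi
    rw [PySem.List.mem_pyRange_one] at hi
    exact count_mult N i v hi.1
  rw [hmap, sum_map_pyRange, cnt_val N v hvN]
  simp

lemma solve_alt_eq (N : Int) :
    solve_alt N = ∑ s ∈ Finset.Icc 1 (N - 1), tau s * tau (N - s) := by
  unfold solve_alt
  simp only [PySem.List.foldl_add, zero_add, sum_map_pyRange]
  have hIco : Finset.Ico (1:Int) N = Finset.Icc 1 (N - 1) := by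
    rw [← Ico_succ_Icc]
    norm_num
  rw [hIco]
  apply Finset.sum_congr rfl
  intro s hs
  simp only [Finset.mem_Icc] at hs
  rw [cnt_final N s (by omega), cnt_final N (N - s) (by omega)]

-- ===== VERDICT (by name: the statement is the Claim_ definition above) =====
theorem solve_spec : Claim_equal_solve := by
  intro N _
  unfold Spec_solve
  by_cases hN : 1 ≤ N
  · rw [solve_eq_sum, solve_alt_eq]
    simp only [Ico_succ_Icc]
    rw [exchange N hN]
    have hins : Finset.Icc (1:Int) N = insert N (Finset.Icc 1 (N - 1)) := by
      ext x
      simp only [Finset.mem_insert, Finset.mem_Icc]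
      omega
    have hnotin : N ∉ Finset.Icc (1:Int) (N - 1) := by
      simp only [Finset.mem_Icc]
      omega
    rw [hins, Finset.sum_insert hnotin, sub_self, tau_zero, mul_zero, zero_add]
  · have e1 : PySem.List.pyRange 1 (N + 1) 1 = [] :=
      PySem.List.pyRange_one_eq_nil (by omega)
    have e2 : PySem.List.pyRange 1 N 1 = [] :=
      PySem.List.pyRange_one_eq_nil (by omega)
    simp [solve, solve_alt, e1, e2]
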